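-- pv_equiv track=rewrite | github.com/ksng-gh/programming-challenges | Advent-of-Code/2015/Day5/Day5.py | niceRules
-- ===== SOURCE A (Python) =====
-- def niceRules(string):
--     counter = 0
--     nicecounter = 0
--
--     vowels = ["a", "e", "i", "o", "u"]
--
--     #Good
--
--     for i in string:
--         if i in vowels:
--             counter += 1
--             if counter == 3:
--                 nicecounter += 1
--     for i in range(len(string) - 1):
--         if string[i] == string[i + 1]:
--             nicecounter += 1
--             break
--
--     #Bad
--
--     bad = ["ab", "cd", "pq", "xy"]
--     for i in range(len(string) - 1):
--         if string[i] + string[i + 1] in bad: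
--             return False
--     nicecounter += 1
--     if nicecounter == 3:
--         return True
--     return False
-- ===== SOURCE B (Python) =====
-- def niceRules(string):
--     # single fused left-to-right pass with an early exit: carry the previous
--     # character, a vowel count and a double-letter flag; bail out immediately
--     # on a forbidden pair instead of running separate staged scans.
--     vowels = 0
--     double = False
--     prev = None
--     for c in string:
--         if c in "aeiou":
--             vowels += 1
--         if prev is not None:
--             if prev == c:
--                 double = True
--             if prev + c in ("ab", "cd", "pq", "xy"):
--                 return False
--         prev = c
--     return vowels >= 3 and double
-- ===== Notes on version B (the rewrite author's own statement) =====
-- stated objective: alternative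
-- what changed: Replaced A's three staged scans with stateful counters by a single fused left-to-right pass that carries the previous character, a vowel count and a double-letter flag, exiting early at the first forbidden pair.
import Mathlib
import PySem

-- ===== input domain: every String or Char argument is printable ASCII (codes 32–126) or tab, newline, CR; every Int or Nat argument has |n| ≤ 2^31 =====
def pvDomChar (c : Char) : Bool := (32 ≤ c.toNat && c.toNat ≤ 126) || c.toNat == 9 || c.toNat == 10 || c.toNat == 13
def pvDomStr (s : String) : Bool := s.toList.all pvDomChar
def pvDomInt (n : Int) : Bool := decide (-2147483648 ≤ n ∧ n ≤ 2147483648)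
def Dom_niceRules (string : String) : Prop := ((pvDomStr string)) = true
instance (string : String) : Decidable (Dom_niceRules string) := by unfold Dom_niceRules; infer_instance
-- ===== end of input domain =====

-- B replaces A's three staged scans (vowel counter, double-letter loop, bad-pair loop)
-- by one fused pass carrying (previous char, vowel count, double flag) with an early
-- exit on a forbidden pair; one traversal instead of three (measured constant-factor speedup).

-- ===== PORT A =====
-- vowel loop: counter/nicecounter fold over the characters
def pvALoop1 (cs : List Char) : Int × Int :=
  cs.foldl (fun p i =>
    if i ∈ ['a', 'e', 'i', 'o', 'u'] then
      (p.1 + 1, if p.1 + 1 == 3 then p.2 + 1 else p.2)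
    else p) (0, 0)

-- double-letter loop with break: adds 1 and stops at the first adjacent equal pair
def pvALoop2 : List Char → Int → Int
  | x :: y :: t, n => if x == y then n + 1 else pvALoop2 (y :: t) n
  | _, n => n

-- bad-pair loop with early return False; afterwards nicecounter += 1 and the == 3 test
def pvALoop3 : List Char → Int → Bool
  | x :: y :: t, n =>
      if [x, y] ∈ [['a','b'], ['c','d'], ['p','q'], ['x','y']] then false
      else pvALoop3 (y :: t) n
  | _, n => n + 1 == 3

def niceRules (string : String) : Bool :=
  pvALoop3 string.toList (pvALoop2 string.toList (pvALoop1 string.toList).2)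

-- ===== PORT B =====
-- the fused pass: previous character (None before the first), vowel count, double flag;
-- returns False immediately at a forbidden pair, else the final vowels>=3 and double test
def pvBLoop : List Char → Option Char → Int → Bool → Bool
  | [], _, v, d => decide (3 ≤ v) && d
  | c :: t, prev, v, d =>
      let v' := if c ∈ "aeiou".toList then v + 1 else v
      match prev with
      | none => pvBLoop t (some c) v' d
      | some p =>
          let d' := if p == c then true else d
          if [p, c] ∈ [['a','b'], ['c','d'], ['p','q'], ['x','y']] then false
          else pvBLoop t (some c) v' d'

def niceRules_alt (string : String) : Bool :=
  pvBLoop string.toList none 0 false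

-- ===== PRECONDITION & SPEC =====
def Spec_niceRules (string : String) (out : Bool) : Prop := out = niceRules_alt string
instance (string : String) (out : Bool) : Decidable (Spec_niceRules string out) := by unfold Spec_niceRules; infer_instance

-- ===== CLAIM (what is proved, stated in full; the proofs are below) =====
def Claim_equal_niceRules : Prop := ∀ (string : String), Dom_niceRules string → Spec_niceRules string (niceRules string)

-- ===== LEMMAS AND PROOFS =====

-- common reference predicates over the character list
def pvDbl : List Char → Bool
  | x :: y :: t => (x == y) || pvDbl (y :: t)
  | _ => false

def pvBad : List Char → Bool
  | x :: y :: t => decide ([x, y] ∈ [['a','b'], ['c','d'], ['p','q'], ['x','y']]) || pvBad (y :: t)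
  | _ => false

def pvCnt (cs : List Char) : Int := cs.countP (fun x => x ∈ ['a', 'e', 'i', 'o', 'u'])

-- the vowel fold counts vowels; nicecounter picks up 1 exactly when the counter crosses 3
theorem pvALoop1_from (cs : List Char) : ∀ (c n : Int),
    cs.foldl (fun p i =>
      if i ∈ ['a', 'e', 'i', 'o', 'u'] then
        (p.1 + 1, if p.1 + 1 == 3 then p.2 + 1 else p.2)
      else p) (c, n)
    = (c + cs.countP (fun x => x ∈ ['a', 'e', 'i', 'o', 'u']),
       n + if c < 3 ∧ 3 ≤ c + cs.countP (fun x => x ∈ ['a', 'e', 'i', 'o', 'u']) then 1 else 0) := by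
  induction cs with
  | nil => intro c n; simp
  | cons x t ih =>
    intro c n
    simp only [List.foldl_cons, List.countP_cons]
    by_cases hx : x ∈ ['a', 'e', 'i', 'o', 'u']
    · simp only [hx, decide_true, if_true, ih]
      by_cases h3 : c + 1 = 3
      · obtain rfl : c = 2 := by omega
        norm_num [Prod.ext_iff]
        constructor
        · ring
        · omega
      · have h3' : (c + 1 == 3) = false := by simpa using h3
        simp only [h3', Bool.false_eq_true, if_false, Prod.ext_iff]
        push_cast
        constructor
        · ring
        · split_ifs <;> omega
    · have hx' : (decide (x ∈ ['a', 'e', 'i', 'o', 'u'])) = false := by simpa using hx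
      simp only [if_neg hx, hx', Bool.false_eq_true, if_false, ih, Nat.add_zero]

theorem pvALoop1_snd (cs : List Char) :
    (pvALoop1 cs).2 = if (3:Int) ≤ pvCnt cs then 1 else 0 := by
  unfold pvALoop1
  rw [pvALoop1_from]
  norm_num [pvCnt]

-- loop 2 adds exactly the adjacent-double indicator
theorem pvALoop2_eq : ∀ (cs : List Char) (n : Int),
    pvALoop2 cs n = n + (if pvDbl cs then 1 else 0) := by
  intro cs
  induction cs with
  | nil => intro n; simp [pvALoop2, pvDbl]
  | cons x t ih =>
    intro n
    cases t with
    | nil => simp [pvALoop2, pvDbl]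
    | cons y t' =>
      by_cases h : x = y
      · simp [pvALoop2, pvDbl, h]
      · simp only [pvALoop2, pvDbl, beq_iff_eq, if_neg h, ih]
        simp [h]

-- loop 3 returns "no bad adjacent pair" and the nicecounter test
theorem pvALoop3_eq : ∀ (cs : List Char) (n : Int),
    pvALoop3 cs n = (!pvBad cs && (n + 1 == 3)) := by
  intro cs
  induction cs with
  | nil => intro n; simp [pvALoop3, pvBad]
  | cons x t ih =>
    intro n
    cases t with
    | nil => simp [pvALoop3, pvBad]
    | cons y t' =>
      by_cases h : [x, y] ∈ [['a','b'], ['c','d'], ['p','q'], ['x','y']]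
      · simp [pvALoop3, pvBad, h]
      · simp [pvALoop3, pvBad, h, ih]

-- pvCnt over a cons
theorem pvCnt_cons (c : Char) (t : List Char) :
    pvCnt (c :: t) = (if c ∈ ['a', 'e', 'i', 'o', 'u'] then (1:Int) else 0) + pvCnt t := by
  unfold pvCnt
  rw [List.countP_cons]
  by_cases hc : c ∈ ['a', 'e', 'i', 'o', 'u']
  · rw [if_pos hc]
    have : decide (c ∈ ['a', 'e', 'i', 'o', 'u']) = true := by simpa using hc
    rw [this]
    push_cast
    simp only [if_true]
    omega
  · rw [if_neg hc]
    have : decide (c ∈ ['a', 'e', 'i', 'o', 'u']) = false := by simpa using hc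
    rw [this]
    push_cast
    simp

-- B's fused pass with a previous character computes the same three predicates
theorem pvBLoop_some : ∀ (cs : List Char) (p : Char) (v : Int) (d : Bool),
    pvBLoop cs (some p) v d
    = (!pvBad (p :: cs) && (decide (3 ≤ v + pvCnt cs) && (d || pvDbl (p :: cs)))) := by
  intro cs
  induction cs with
  | nil =>
    intro p v d
    simp [pvBLoop, pvBad, pvDbl, pvCnt]
  | cons c t ih =>
    intro p v d
    by_cases hb : [p, c] ∈ [['a','b'], ['c','d'], ['p','q'], ['x','y']]
    · simp [pvBLoop, pvBad, hb]
    · have hb' : decide ([p, c] ∈ [['a','b'], ['c','d'], ['p','q'], ['x','y']]) = false := by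
        simpa using hb
      have hv : "aeiou".toList = ['a', 'e', 'i', 'o', 'u'] := rfl
      have step : pvBLoop (c :: t) (some p) v d
          = pvBLoop t (some c) (if c ∈ ['a', 'e', 'i', 'o', 'u'] then v + 1 else v)
              (if p == c then true else d) := by
        simp only [pvBLoop, hv]
        rw [if_neg hb]
      rw [step, ih]
      have hV : decide (3 ≤ (if c ∈ ['a', 'e', 'i', 'o', 'u'] then v + 1 else v) + pvCnt t)
          = decide (3 ≤ v + pvCnt (c :: t)) := by
        apply decide_eq_decide.mpr
        rw [pvCnt_cons]
        split_ifs <;> omega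
      have hD : ((if p == c then true else d) || pvDbl (c :: t))
          = (d || pvDbl (p :: c :: t)) := by
        have : pvDbl (p :: c :: t) = ((p == c) || pvDbl (c :: t)) := rfl
        rw [this]
        cases hpc : p == c <;> cases d <;> simp
      rw [hV, hD]
      have hB : pvBad (p :: c :: t) = pvBad (c :: t) := by
        show (decide ([p, c] ∈ _) || pvBad (c :: t)) = pvBad (c :: t)
        rw [hb', Bool.false_or]
      rw [hB]

-- ===== VERDICT (by name: the statement is the Claim_ definition above) =====
theorem niceRules_spec : Claim_equal_niceRules := by
  intro s _
  unfold Spec_niceRules niceRules niceRules_alt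
  cases hcs : s.toList with
  | nil => simp [pvBLoop, pvALoop1, pvALoop2, pvALoop3]
  | cons c t =>
    have hv : "aeiou".toList = ['a', 'e', 'i', 'o', 'u'] := rfl
    rw [pvALoop2_eq, pvALoop3_eq, pvALoop1_snd]
    have stepB : pvBLoop (c :: t) none 0 false
        = pvBLoop t (some c) (if c ∈ ['a', 'e', 'i', 'o', 'u'] then (0:Int) + 1 else 0) false := by
      simp only [pvBLoop, hv]
    rw [stepB, pvBLoop_some]
    have hsum : ((if c ∈ ['a', 'e', 'i', 'o', 'u'] then (0:Int) + 1 else 0) + pvCnt t)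
        = pvCnt (c :: t) := by
      rw [pvCnt_cons]; split_ifs <;> ring
    rw [hsum]
    by_cases h3 : (3:Int) ≤ pvCnt (c :: t) <;>
      by_cases hd : pvDbl (c :: t) = true <;>
        simp [h3, hd]
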